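-- pv_equiv track=rewrite | github.com/cirosantilli/project-euler-solvers | solvers/629.py | partition_numbers_up_to
-- ===== SOURCE A (Python) =====
-- MOD = 1_000_000_007
--
-- def partition_numbers_up_to(N, mod=MOD):
--     """Return list p[0..N] where p[n] = number of integer partitions of n (mod)."""
--     p = [0] * (N + 1)
--     p[0] = 1
--     for part in range(1, N + 1):
--         for s in range(part, N + 1):
--             p[s] += p[s - part]
--             if p[s] >= mod:
--                 p[s] -= mod
--     return p
-- ===== SOURCE B (Python) =====
-- MOD = 1_000_000_007
--
-- def partition_numbers_up_to(N, mod=MOD):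
--     """Return list p[0..N] where p[n] = number of integer partitions of n (mod).
--
--     Different algorithm from the parts-<=k knapsack DP: counts partitions by
--     their exact number of parts k, via e(n,k) = e(n-1,k-1) + e(n-k,k)
--     (smallest part 1 removed / 1 subtracted from each of the k parts),
--     accumulating p[n] = sum_k e(n,k) on the fly with one rolled row."""
--     p = [0] * (N + 1)
--     p[0] = 1
--     prev = [1] + [0] * N          # prev[n] = e(n, k-1)
--     for k in range(1, N + 1):
--         cur = [0] * (N + 1)       # cur[n] = e(n, k)
--         for n in range(k, N + 1):
--             cur[n] = (prev[n - 1] + cur[n - k]) % mod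
--             p[n] = (p[n] + cur[n]) % mod
--         prev = cur
--     return p
-- ===== Notes on version B (the rewrite author's own statement) =====
-- stated objective: alternative
-- what changed: A runs the parts-bounded knapsack DP in place (p[s] += p[s-part], subtract-once reduction); B counts partitions by their exact number of parts k with the different recurrence e(n,k)=e(n-1,k-1)+e(n-k,k) on a rolled row and accumulates p[n]=sum_k e(n,k) with Python's % operator.
-- outside the precondition, e.g. on partition_numbers_up_to(3, 0): A returns [1, 1, 2, 3], B raises ZeroDivisionError; on partition_numbers_up_to(4, -2): A returns [1, 3, 8, 15, 27], B returns [1, -1, 0, -1, -1]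
import Mathlib
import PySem

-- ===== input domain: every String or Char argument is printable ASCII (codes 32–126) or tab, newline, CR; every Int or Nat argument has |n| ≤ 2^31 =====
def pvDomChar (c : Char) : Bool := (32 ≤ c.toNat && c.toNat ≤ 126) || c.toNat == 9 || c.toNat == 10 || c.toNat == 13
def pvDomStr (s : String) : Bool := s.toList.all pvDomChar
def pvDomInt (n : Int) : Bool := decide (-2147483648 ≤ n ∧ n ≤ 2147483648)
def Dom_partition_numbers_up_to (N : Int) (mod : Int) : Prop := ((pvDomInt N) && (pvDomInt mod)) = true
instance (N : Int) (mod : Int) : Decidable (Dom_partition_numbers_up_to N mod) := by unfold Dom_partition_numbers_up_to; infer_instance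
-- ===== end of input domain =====

-- B replaces A's in-place parts-bounded knapsack DP by the different recurrence on
-- exact-number-of-parts counts, e(n,k) = e(n-1,k-1) + e(n-k,k), accumulating
-- p[n] = Σ_k e(n,k) over a rolled row (objective: alternative; same O(N²) cost).

-- ===== PORT A =====
def pyA_inner (mod : Int) (part : Int) (p : List Int) (s : Int) : List Int :=
  let v := PySem.List.pyGetD p s 0 + PySem.List.pyGetD p (s - part) 0
  let v := if v ≥ mod then v - mod else v
  PySem.List.pySetD p s v

def partition_numbers_up_to (N : Int) (mod : Int) : List Int :=
  let p := List.replicate (N + 1).toNat 0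
  let p := PySem.List.pySetD p 0 1
  (PySem.List.pyRange 1 (N + 1) 1).foldl
    (fun p part => (PySem.List.pyRange part (N + 1) 1).foldl (pyA_inner mod part) p) p

-- ===== PORT B =====
def pyB_inner (mod : Int) (k : Int) (prev : List Int) (st : List Int × List Int) (n : Int) :
    List Int × List Int :=
  let c := PySem.Int.mod (PySem.List.pyGetD prev (n - 1) 0 + PySem.List.pyGetD st.1 (n - k) 0) mod
  let cur := PySem.List.pySetD st.1 n c
  let p := PySem.List.pySetD st.2 n (PySem.Int.mod (PySem.List.pyGetD st.2 n 0 + c) mod)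
  (cur, p)

def pyB_outer (N : Int) (mod : Int) (st : List Int × List Int) (k : Int) : List Int × List Int :=
  let cur := List.replicate (N + 1).toNat 0
  let r := (PySem.List.pyRange k (N + 1) 1).foldl (pyB_inner mod k st.1) (cur, st.2)
  (r.1, r.2)

def partition_numbers_up_to_alt (N : Int) (mod : Int) : List Int :=
  let p := PySem.List.pySetD (List.replicate (N + 1).toNat 0) 0 1
  let prev := 1 :: List.replicate N.toNat 0
  ((PySem.List.pyRange 1 (N + 1) 1).foldl (pyB_outer N mod) (prev, p)).2


-- ===== PRECONDITION & SPEC =====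
-- Pre_ excludes N < 0, where A raises IndexError, and mod ≤ 0, which is not a modulus:
-- there A's subtract-once "reduction" returns accidental unreduced/inflated counts while
-- B's use of Python's % raises ZeroDivisionError (mod = 0) or yields different residues.
def Pre_partition_numbers_up_to (N : Int) (mod : Int) : Prop := 0 ≤ N ∧ 1 ≤ mod
instance (N : Int) (mod : Int) : Decidable (Pre_partition_numbers_up_to N mod) := by
  unfold Pre_partition_numbers_up_to; infer_instance
def pvWitness_partition_numbers_up_to : Int × Int := (6, 10)

def Spec_partition_numbers_up_to (N : Int) (mod : Int) (out : List Int) : Prop := out = partition_numbers_up_to_alt N mod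
instance (N : Int) (mod : Int) (out : List Int) : Decidable (Spec_partition_numbers_up_to N mod out) := by unfold Spec_partition_numbers_up_to; infer_instance

-- ===== CLAIM (what is proved, stated in full; the proofs are below) =====
def Claim_equal_partition_numbers_up_to : Prop := ∀ (N : Int) (mod : Int), Dom_partition_numbers_up_to N mod → Pre_partition_numbers_up_to N mod → Spec_partition_numbers_up_to N mod (partition_numbers_up_to N mod)

-- ===== LEMMAS AND PROOFS =====

def bPart : Nat → Nat → Nat
  | 0, _ => 1
  | _+1, 0 => 0
  | n+1, k+1 => bPart (n+1) k + (if k + 1 ≤ n + 1 then bPart (n-k) (k+1) else 0)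
termination_by n k => (n, k)

def ePart : Nat → Nat → Nat
  | 0, 0 => 1
  | 0, _+1 => 0
  | _+1, 0 => 0
  | n+1, k+1 => ePart n k + (if k + 1 ≤ n + 1 then ePart (n-k) (k+1) else 0)
termination_by n k => n

lemma b_zero (t : Nat) : bPart t 0 = if t = 0 then 1 else 0 := by
  cases t <;> simp [bPart]

lemma b_stable (t k : Nat) (h : t ≤ k) : bPart t (k+1) = bPart t k := by
  cases t with
  | zero => simp [bPart]
  | succ t =>
    rw [bPart]
    have hne : ¬ (k + 1 ≤ t + 1) := by omega
    simp [hne]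

lemma b_rec (s k : Nat) (h : k + 1 ≤ s) :
    bPart s (k+1) = bPart s k + bPart (s - (k+1)) (k+1) := by
  cases s with
  | zero => omega
  | succ s =>
    rw [bPart]
    have hs : s + 1 - (k+1) = s - k := by omega
    simp [h, hs]

lemma e_eq_b : ∀ (t k : Nat), ePart t k = if k ≤ t then bPart (t - k) k else 0 := by
  intro t
  induction t using Nat.strong_induction_on with
  | _ t ih =>
    intro k
    match t, k with
    | 0, 0 => simp [ePart, bPart]
    | 0, k+1 => simp [ePart]
    | t+1, 0 => simp [ePart, b_zero]
    | t+1, k+1 =>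
      rw [ePart, ih t (by omega) k, ih (t-k) (by omega) (k+1)]
      by_cases hk : k ≤ t
      · have h1 : k + 1 ≤ t + 1 := by omega
        have ht : t + 1 - (k+1) = t - k := by omega
        simp only [hk, if_true, h1, ht]
        rcases Nat.eq_zero_or_pos (t - k) with h0 | h0
        · have hne : ¬ (k + 1 ≤ t - k) := by omega
          rw [h0] at hne ⊢
          simp [hne, bPart]
        · obtain ⟨w, hw⟩ : ∃ w, t - k = w + 1 := ⟨t - k - 1, by omega⟩
          rw [hw]
          conv_rhs => rw [bPart]
          have hsub : w + 1 - (k + 1) = w - k := by omega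
          simp only [hsub]
      · have h1 : ¬ (k + 1 ≤ t + 1) := by omega
        simp [hk, h1]

lemma b_succ_e (t k : Nat) : bPart t (k+1) = bPart t k + ePart t (k+1) := by
  cases t with
  | zero => simp [bPart, ePart]
  | succ t =>
    rw [bPart, e_eq_b]
    by_cases h : k + 1 ≤ t + 1
    · have ht : t + 1 - (k+1) = t - k := by omega
      simp [h, ht]
    · simp [h]

lemma e_rec (s k : Nat) (h1 : 1 ≤ k) (h2 : k ≤ s) :
    ePart s k = ePart (s-1) (k-1) + ePart (s-k) k := by
  obtain ⟨s', rfl⟩ : ∃ s', s = s' + 1 := ⟨s - 1, by omega⟩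
  obtain ⟨k', rfl⟩ : ∃ k', k = k' + 1 := ⟨k - 1, by omega⟩
  rw [ePart]
  have ha : s' + 1 - 1 = s' := by omega
  have hb : k' + 1 - 1 = k' := by omega
  have hc : s' + 1 - (k' + 1) = s' - k' := by omega
  simp [h2, ha, hb, hc]

def pmF (m : Int) (k t : Nat) : Int := if t = 0 then 1 else ((bPart t k : Nat) : Int) % m
def emF (m : Int) (k t : Nat) : Int := ((ePart t k : Nat) : Int) % m

lemma pm_stable (m : Int) (k t : Nat) (h : t ≤ k) : pmF m (k+1) t = pmF m k t := by
  unfold pmF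
  rcases Nat.eq_zero_or_pos t with h0 | h0
  · simp [h0]
  · have ht : t ≠ 0 := by omega
    simp [ht, b_stable t k h]

lemma subOnce (m x : Int) (hm : 0 < m) (h0 : 0 ≤ x) (h2 : x < 2*m) :
    (if m ≤ x then x - m else x) = x % m := by
  split
  · next h =>
    have hx : (x - m) % m = x % m := by
      have := Int.add_mul_emod_self_left (a := x - m) (b := m) (c := 1)
      simpa using this
    rw [← hx, Int.emod_eq_of_lt (by omega) (by omega)]
  · next h => rw [Int.emod_eq_of_lt h0 (by omega)]

lemma A_step_val (m : Int) (hm : 0 < m) (kk s : Nat) (h1 : 1 ≤ kk) (h2 : kk ≤ s) :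
    (if m ≤ pmF m (kk-1) s + pmF m kk (s-kk) then pmF m (kk-1) s + pmF m kk (s-kk) - m
     else pmF m (kk-1) s + pmF m kk (s-kk)) = pmF m kk s := by
  have hs0 : s ≠ 0 := by omega
  have hbrec : bPart s kk = bPart s (kk-1) + bPart (s-kk) kk := by
    have := b_rec s (kk-1) (by omega)
    simpa [Nat.sub_add_cancel h1] using this
  have e1 : pmF m (kk-1) s = ((bPart s (kk-1) : Nat) : Int) % m := by simp [pmF, hs0]
  have e3 : pmF m kk s = ((bPart s kk : Nat) : Int) % m := by simp [pmF, hs0]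
  have hXnn : 0 ≤ ((bPart s (kk-1) : Nat) : Int) % m := Int.emod_nonneg _ (by omega)
  have hXlt : ((bPart s (kk-1) : Nat) : Int) % m < m := Int.emod_lt_of_pos _ hm
  rcases Nat.eq_zero_or_pos (s - kk) with h0 | h0
  · have e2 : pmF m kk (s-kk) = 1 := by simp [pmF, h0]
    rw [e1, e2, e3]
    rw [subOnce m _ hm (by omega) (by omega)]
    rw [Int.emod_add_emod]
    have hone : bPart (s - kk) kk = 1 := by rw [h0]; simp [bPart]
    rw [hbrec, hone]
    push_cast
    ring_nf
  · have ht0 : s - kk ≠ 0 := by omega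
    have e2 : pmF m kk (s-kk) = ((bPart (s-kk) kk : Nat) : Int) % m := by simp [pmF, ht0]
    have hYnn : 0 ≤ ((bPart (s-kk) kk : Nat) : Int) % m := Int.emod_nonneg _ (by omega)
    have hYlt : ((bPart (s-kk) kk : Nat) : Int) % m < m := Int.emod_lt_of_pos _ hm
    rw [e1, e2, e3]
    rw [subOnce m _ hm (by omega) (by omega)]
    rw [← Int.add_emod]
    rw [hbrec]
    push_cast
    ring_nf
lemma e_zero_of_lt (t k : Nat) (h : t < k) : ePart t k = 0 := by
  rw [e_eq_b]
  simp [Nat.not_le.mpr h]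

lemma map_range_set (g h : Nat → Int) (n s : Nat) (v : Int) (hs : s < n)
    (hagree : ∀ t, t ≠ s → g t = h t) (hv : v = h s) :
    ((List.range n).map g).set s v = (List.range n).map h := by
  apply List.ext_getElem (by simp)
  intro i hi1 hi2
  simp only [List.getElem_set, List.getElem_map, List.getElem_range]
  split
  · next he => subst he; simpa using hv
  · next he => exact hagree i (by simpa using (Ne.symm he))

lemma A_step (m : Int) (hm : 0 < m) (n kk s : Nat) (h1 : 1 ≤ kk) (hks : kk ≤ s)
    (hslt : s < n + 1) :
    pyA_inner m (kk : Int)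
        ((List.range (n+1)).map (fun t => if t < s then pmF m kk t else pmF m (kk-1) t)) (s : Int)
      = (List.range (n+1)).map (fun t => if t < s + 1 then pmF m kk t else pmF m (kk-1) t) := by
  unfold pyA_inner
  have hc : (s : Int) - (kk : Int) = ((s - kk : Nat) : Int) := by omega
  rw [hc]
  simp only [PySem.List.pyGetD_natCast, PySem.List.pySetD_natCast]
  rw [PySem.List.getD_map_range _ _ _ _ hslt,
      PySem.List.getD_map_range _ _ _ _ (by omega : s - kk < n + 1)]
  have hif1 : (if s < s then pmF m kk s else pmF m (kk-1) s) = pmF m (kk-1) s := by simp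
  have hif2 : (if s - kk < s then pmF m kk (s-kk) else pmF m (kk-1) (s-kk)) = pmF m kk (s-kk) := by
    have : s - kk < s := by omega
    simp [this]
  rw [hif1, hif2]
  apply map_range_set _ _ _ _ _ hslt
  · intro t ht
    by_cases h : t < s
    · simp [h, show t < s + 1 from by omega]
    · simp [h, show ¬ (t < s + 1) from by omega]
  · have hrhs : (if s < s + 1 then pmF m kk s else pmF m (kk-1) s) = pmF m kk s := by
      simp
    rw [hrhs]
    exact A_step_val m hm kk s h1 hks

lemma A_pass (m : Int) (hm : 0 < m) (n kk : Nat) (h1 : 1 ≤ kk) :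
    ∀ (d s : Nat), kk ≤ s → s + d = n + 1 →
    (PySem.List.pyRange (s : Int) ((n : Int) + 1) 1).foldl (pyA_inner m (kk : Int))
        ((List.range (n+1)).map (fun t => if t < s then pmF m kk t else pmF m (kk-1) t))
      = (List.range (n+1)).map (pmF m kk) := by
  intro d
  induction d with
  | zero =>
    intro s hks hsd
    have hs : ((n : Int) + 1) ≤ (s : Int) := by omega
    rw [PySem.List.pyRange_one_eq_nil hs]
    simp only [List.foldl_nil]
    apply List.map_congr_left
    intro t htmem
    have : t < s := by have := List.mem_range.mp htmem; omega
    simp [this]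
  | succ d ih =>
    intro s hks hsd
    have hslt : (s : Int) < (n : Int) + 1 := by omega
    rw [PySem.List.pyRange_one_cons hslt, List.foldl_cons]
    rw [A_step m hm n kk s h1 hks (by omega)]
    have := ih (s+1) (by omega) (by omega)
    rw [show ((s:Int) + 1) = ((s + 1 : Nat) : Int) from by omega]
    exact this

lemma init_p (m : Int) (n : Nat) :
    PySem.List.pySetD (List.replicate (n + 1) (0 : Int)) 0 1
      = (List.range (n+1)).map (pmF m 0) := by
  rw [PySem.List.pySetD_of_nonneg _ _ (by omega)]
  apply List.ext_getElem (by simp)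
  intro i hi1 hi2
  simp only [List.getElem_set, List.getElem_replicate, List.getElem_map, List.getElem_range]
  rcases Nat.eq_zero_or_pos i with h0 | h0
  · simp [h0, pmF]
  · have hne : i ≠ 0 := by omega
    simp [pmF, b_zero, hne, Ne.symm hne]

lemma A_result (m : Int) (hm : 0 < m) (n : Nat) :
    partition_numbers_up_to (n : Int) m = (List.range (n+1)).map (pmF m n) := by
  show (PySem.List.pyRange 1 ((n : Int) + 1) 1).foldl
      (fun p part => (PySem.List.pyRange part ((n : Int) + 1) 1).foldl (pyA_inner m part) p)
      (PySem.List.pySetD (List.replicate ((n : Int) + 1).toNat 0) 0 1)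
    = (List.range (n+1)).map (pmF m n)
  have hlen : ((n : Int) + 1).toNat = n + 1 := by omega
  rw [hlen, init_p m n]
  -- outer induction
  suffices h : ∀ K : Nat, K ≤ n →
      (PySem.List.pyRange 1 ((K : Int) + 1) 1).foldl
        (fun p part => (PySem.List.pyRange part ((n : Int) + 1) 1).foldl (pyA_inner m part) p)
        ((List.range (n+1)).map (pmF m 0))
      = (List.range (n+1)).map (pmF m K) by
    exact h n (le_refl n)
  intro K
  induction K with
  | zero =>
    intro _
    rw [PySem.List.pyRange_one_eq_nil (by omega)]
    simp
  | succ K ih =>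
    intro hK
    rw [show ((K + 1 : Nat) : Int) + 1 = ((K : Int) + 1) + 1 from by omega]
    rw [PySem.List.pyRange_one_succ_right (by omega), List.foldl_append]
    rw [ih (by omega)]
    simp only [List.foldl_cons, List.foldl_nil]
    have hstart : (List.range (n+1)).map (pmF m K)
        = (List.range (n+1)).map (fun t => if t < K + 1 then pmF m (K+1) t else pmF m K t) := by
      apply List.map_congr_left
      intro t _
      by_cases h : t < K + 1
      · simp [h, (pm_stable m K t (by omega)).symm]
      · simp [h]
    rw [hstart]
    have := A_pass m hm n (K+1) (by omega) (n - K) (K+1) (le_refl _) (by omega)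
    rw [show ((K : Int) + 1) = ((K + 1 : Nat) : Int) from by omega]
    simpa [Nat.add_sub_cancel] using this

lemma replicate_eq_map_e (m : Int) (kk n : Nat) :
    (List.replicate (n+1) (0:Int))
      = (List.range (n+1)).map (fun t => if t < kk then emF m kk t else 0) := by
  apply List.ext_getElem (by simp)
  intro i hi1 hi2
  simp only [List.getElem_replicate, List.getElem_map, List.getElem_range]
  by_cases h : i < kk
  · simp [h, emF, e_zero_of_lt i kk h]
  · simp [h]

lemma B_step (m : Int) (hm : 0 < m) (n kk s : Nat) (h1 : 1 ≤ kk) (hks : kk ≤ s)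
    (hslt : s < n + 1) (prev : List Int)
    (hprev : ∀ t, t < n + 1 → (prev.getD t 0) % m = emF m (kk-1) t) :
    pyB_inner m (kk : Int) prev
        ((List.range (n+1)).map (fun t => if t < s then emF m kk t else 0),
         (List.range (n+1)).map (fun t => if t < s then pmF m kk t else pmF m (kk-1) t)) (s : Int)
      = ((List.range (n+1)).map (fun t => if t < s + 1 then emF m kk t else 0),
         (List.range (n+1)).map (fun t => if t < s + 1 then pmF m kk t else pmF m (kk-1) t)) := by
  unfold pyB_inner
  have hc1 : (s:Int) - 1 = ((s-1 : Nat) : Int) := by omega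
  have hc2 : (s:Int) - (kk:Int) = ((s-kk : Nat) : Int) := by omega
  rw [hc1, hc2]
  simp only [PySem.List.pyGetD_natCast, PySem.List.pySetD_natCast,
             PySem.Int.mod_eq_emod_of_pos hm]
  rw [PySem.List.getD_map_range _ _ _ _ (show s - kk < n+1 by omega),
      PySem.List.getD_map_range _ _ _ _ hslt]
  have hcur : (if s - kk < s then emF m kk (s-kk) else 0) = emF m kk (s-kk) := by
    have h : s - kk < s := by omega
    simp [h]
  have hp : (if s < s then pmF m kk s else pmF m (kk-1) s) = pmF m (kk-1) s := by simp
  rw [hcur, hp]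
  have hcval : (prev.getD (s-1) 0 + emF m kk (s-kk)) % m = emF m kk s := by
    unfold emF
    rw [Int.add_emod]
    rw [Int.emod_emod_of_dvd _ dvd_rfl]
    rw [hprev (s-1) (by omega)]
    unfold emF
    rw [← Int.add_emod]
    rw [e_rec s kk h1 hks]
    push_cast
    ring_nf
  rw [hcval]
  have hpval : (pmF m (kk-1) s + emF m kk s) % m = pmF m kk s := by
    have hs0 : s ≠ 0 := by omega
    have hbe : bPart s kk = bPart s (kk-1) + ePart s kk := by
      have := b_succ_e s (kk-1)
      simpa [Nat.sub_add_cancel h1] using this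
    simp only [pmF, emF, if_neg hs0]
    rw [Int.add_emod]
    rw [Int.emod_emod_of_dvd _ dvd_rfl, Int.emod_emod_of_dvd _ dvd_rfl]
    rw [← Int.add_emod, hbe]
    push_cast
    ring_nf
  rw [hpval]
  rw [map_range_set (fun t => if t < s then emF m kk t else 0)
        (fun t => if t < s + 1 then emF m kk t else 0) (n+1) s (emF m kk s) hslt
        (by intro t ht
            by_cases h : t < s
            · simp [h, show t < s + 1 from by omega]
            · simp [h, show ¬ (t < s + 1) from by omega])
        (by simp)]
  rw [map_range_set (fun t => if t < s then pmF m kk t else pmF m (kk-1) t)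
        (fun t => if t < s + 1 then pmF m kk t else pmF m (kk-1) t) (n+1) s (pmF m kk s) hslt
        (by intro t ht
            by_cases h : t < s
            · simp [h, show t < s + 1 from by omega]
            · simp [h, show ¬ (t < s + 1) from by omega])
        (by simp)]

lemma B_pass (m : Int) (hm : 0 < m) (n kk : Nat) (h1 : 1 ≤ kk) (prev : List Int)
    (hprev : ∀ t, t < n + 1 → (prev.getD t 0) % m = emF m (kk-1) t) :
    ∀ (d s : Nat), kk ≤ s → s + d = n + 1 →
    (PySem.List.pyRange (s : Int) ((n : Int) + 1) 1).foldl (pyB_inner m (kk : Int) prev)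
        ((List.range (n+1)).map (fun t => if t < s then emF m kk t else 0),
         (List.range (n+1)).map (fun t => if t < s then pmF m kk t else pmF m (kk-1) t))
      = ((List.range (n+1)).map (emF m kk), (List.range (n+1)).map (pmF m kk)) := by
  intro d
  induction d with
  | zero =>
    intro s hks hsd
    have hs : ((n : Int) + 1) ≤ (s : Int) := by omega
    rw [PySem.List.pyRange_one_eq_nil hs]
    simp only [List.foldl_nil]
    have g1 : (List.range (n+1)).map (fun t => if t < s then emF m kk t else 0)
        = (List.range (n+1)).map (emF m kk) := by
      apply List.map_congr_left
      intro t htmem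
      have : t < s := by have := List.mem_range.mp htmem; omega
      simp [this]
    have g2 : (List.range (n+1)).map (fun t => if t < s then pmF m kk t else pmF m (kk-1) t)
        = (List.range (n+1)).map (pmF m kk) := by
      apply List.map_congr_left
      intro t htmem
      have : t < s := by have := List.mem_range.mp htmem; omega
      simp [this]
    rw [g1, g2]
  | succ d ih =>
    intro s hks hsd
    have hslt : (s : Int) < (n : Int) + 1 := by omega
    rw [PySem.List.pyRange_one_cons hslt, List.foldl_cons]
    rw [B_step m hm n kk s h1 hks (by omega) prev hprev]
    have := ih (s+1) (by omega) (by omega)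
    rw [show ((s:Int) + 1) = ((s + 1 : Nat) : Int) from by omega]
    exact this

lemma getD_replicate_zero (n t : Nat) : (List.replicate n (0:Int)).getD t 0 = 0 := by
  by_cases h : t < n <;> simp [List.getD_eq_getElem?_getD, List.getElem?_replicate, h]

lemma B_outer (m : Int) (hm : 0 < m) (n : Nat) :
    ∀ (K : Nat), K ≤ n → ∀ (prev : List Int),
    (∀ t, t < n + 1 → (prev.getD t 0) % m = emF m 0 t) →
    (∀ t, t < n + 1 →
        (((PySem.List.pyRange 1 ((K : Int) + 1) 1).foldl (pyB_outer (n : Int) m)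
          (prev, (List.range (n+1)).map (pmF m 0))).1.getD t 0) % m = emF m K t)
    ∧ ((PySem.List.pyRange 1 ((K : Int) + 1) 1).foldl (pyB_outer (n : Int) m)
          (prev, (List.range (n+1)).map (pmF m 0))).2 = (List.range (n+1)).map (pmF m K) := by
  intro K
  induction K with
  | zero =>
    intro _ prev hprev
    rw [PySem.List.pyRange_one_eq_nil (by omega)]
    exact ⟨hprev, rfl⟩
  | succ K ih =>
    intro hK prev hprev
    rw [show ((K + 1 : Nat) : Int) + 1 = ((K : Int) + 1) + 1 from by omega,
        PySem.List.pyRange_one_succ_right (by omega), List.foldl_append]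
    obtain ⟨ih1, ih2⟩ := ih (by omega) prev hprev
    simp only [List.foldl_cons, List.foldl_nil]
    set st := (PySem.List.pyRange 1 ((K:Int)+1) 1).foldl (pyB_outer (n:Int) m)
      (prev, (List.range (n+1)).map (pmF m 0)) with hst
    unfold pyB_outer
    have hlen : ((n : Int) + 1).toNat = n + 1 := by omega
    rw [hlen]
    rw [replicate_eq_map_e m (K+1) n, ih2]
    have hstart : (List.range (n+1)).map (pmF m K)
        = (List.range (n+1)).map (fun t => if t < K + 1 then pmF m (K+1) t else pmF m K t) := by
      apply List.map_congr_left
      intro t _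
      by_cases h : t < K + 1
      · simp [h, (pm_stable m K t (by omega)).symm]
      · simp [h]
    rw [hstart]
    have hprev' : ∀ t, t < n + 1 → (st.1.getD t 0) % m = emF m ((K+1)-1) t := by
      simpa using ih1
    have hpass := B_pass m hm n (K+1) (by omega) st.1 hprev' (n - K) (K+1) (le_refl _) (by omega)
    rw [show ((K : Int) + 1) = ((K + 1 : Nat) : Int) from by omega]
    have hres : (PySem.List.pyRange ((K + 1 : Nat) : Int) ((n:Int) + 1) 1).foldl
        (pyB_inner m ((K + 1 : Nat) : Int) st.1)
        ((List.range (n+1)).map (fun t => if t < K + 1 then emF m (K+1) t else 0),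
         (List.range (n+1)).map (fun t => if t < K + 1 then pmF m (K+1) t else pmF m K t))
      = ((List.range (n+1)).map (emF m (K+1)), (List.range (n+1)).map (pmF m (K+1))) := by
      simpa [Nat.add_sub_cancel] using hpass
    simp only [hres]
    constructor
    · intro t ht
      rw [PySem.List.getD_map_range _ _ _ _ ht]
      unfold emF
      exact Int.emod_emod_of_dvd _ dvd_rfl
    · trivial

theorem final_equiv (N m : Int) (hN : 0 ≤ N) (hm' : 1 ≤ m) :
    partition_numbers_up_to N m = partition_numbers_up_to_alt N m := by
  obtain ⟨n, rfl⟩ : ∃ n : Nat, N = (n : Int) := ⟨N.toNat, (Int.toNat_of_nonneg hN).symm⟩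
  have hm : 0 < m := by omega
  rw [A_result m hm n]
  show (List.range (n+1)).map (pmF m n)
      = ((PySem.List.pyRange 1 ((n : Int) + 1) 1).foldl (pyB_outer (n : Int) m)
          (1 :: List.replicate (n : Int).toNat 0,
           PySem.List.pySetD (List.replicate ((n : Int) + 1).toNat 0) 0 1)).2
  have hlen : ((n : Int) + 1).toNat = n + 1 := by omega
  have hNt : ((n : Int)).toNat = n := by omega
  rw [hlen, hNt, init_p m n]
  have hprev0 : ∀ t, t < n + 1 → ((1 :: List.replicate n (0:Int)).getD t 0) % m = emF m 0 t := by
    intro t ht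
    cases t with
    | zero => simp [emF, ePart]
    | succ t =>
      simp only [List.getD_cons_succ, getD_replicate_zero]
      simp [emF, ePart]
  exact ((B_outer m hm n n le_rfl _ hprev0).2).symm

-- ===== VERDICT (by name: the statement is the Claim_ definition above) =====
theorem partition_numbers_up_to_spec : Claim_equal_partition_numbers_up_to := by
  intro N mod _ hpre
  exact final_equiv N mod hpre.1 hpre.2
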